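-- pv_equiv track=rewrite | github.com/ghostescript/ovaltinepy | ovaltine.py | binary_handler
-- ===== SOURCE A (Python) =====
-- def binary_handler(text, choice, **kwargs):
--     if choice == '1':
--         return ' '.join(format(ord(char), '08b') for char in text)
--     elif choice == '2':
--         binary_string = text.replace(' ', '')
--         if len(binary_string) % 8 != 0:
--             raise ValueError("Binary string length is not a multiple of 8.")
--         return "".join([chr(int(binary_string[i:i+8], 2)) for i in range(0, len(binary_string), 8)])
-- ===== SOURCE B (Python) =====
-- def binary_handler(text, choice, **kwargs):
--     if choice == '1':
--         out = []
--         for ch in text: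
--             code = ord(ch)
--             out.append(''.join('1' if (code >> k) & 1 else '0' for k in range(7, -1, -1)))
--         return ' '.join(out)
--     elif choice == '2':
--         bits = text.replace(' ', '')
--         if len(bits) % 8 != 0:
--             raise ValueError("Binary string length is not a multiple of 8.")
--         chars = []
--         acc = cnt = 0
--         for b in bits:
--             if b == '1':
--                 acc = acc * 2 + 1
--             elif b == '0':
--                 acc = acc * 2
--             else:
--                 raise ValueError("invalid binary digit: %r" % b)
--             cnt += 1
--             if cnt == 8:
--                 chars.append(chr(acc))
--                 acc = cnt = 0
--         return ''.join(chars)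
-- ===== Notes on version B (the rewrite author's own statement) =====
-- stated objective: alternative
-- what changed: Encode derives each of the 8 bits by shifting and masking the code point instead of format(ord(c),'08b'); decode is a single left-to-right pass with a value accumulator and bit counter instead of slicing the string into 8-character chunks and calling int(chunk, 2).
-- outside the precondition, e.g. on binary_handler('0000_000', '2'): A returns '\x00', B raises ValueError; on binary_handler('+0000001', '2'): A returns '\x01', B raises ValueError; on binary_handler('\t0000001', '2'): A returns '\x01', B raises ValueError
import Mathlib
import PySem

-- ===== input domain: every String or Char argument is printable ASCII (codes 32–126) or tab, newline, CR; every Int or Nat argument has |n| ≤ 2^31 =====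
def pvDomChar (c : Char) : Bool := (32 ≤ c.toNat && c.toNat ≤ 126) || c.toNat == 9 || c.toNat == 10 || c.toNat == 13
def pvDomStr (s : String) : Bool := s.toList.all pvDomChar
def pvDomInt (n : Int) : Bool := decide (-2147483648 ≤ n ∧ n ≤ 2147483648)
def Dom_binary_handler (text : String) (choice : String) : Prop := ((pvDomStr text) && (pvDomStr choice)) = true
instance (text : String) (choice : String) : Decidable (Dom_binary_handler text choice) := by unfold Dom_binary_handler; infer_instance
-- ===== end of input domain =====

-- B re-implements both branches with different mechanics (bit shifts/masks for encode, a
-- single-pass accumulator for decode) at the same O(n) cost; equivalence is about return values.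

-- ===== PORT A =====
-- format(ord(char), '08b'): binary digits of n, zero-padded on the left to width 8
def pvFmt08b (n : Nat) : List Char := PySem.Chars.zfill (Nat.toDigits 2 n) 8

def binary_handler (text : String) (choice : String) : Option String :=
  if choice = "1" then
    some (String.ofList (PySem.Chars.join [' '] (text.toList.map (fun c => pvFmt08b c.toNat))))
  else if choice = "2" then
    let bs := PySem.Chars.replace text.toList [' '] []
    if bs.length % 8 ≠ 0 then none  -- raise ValueError
    else
      ((PySem.List.pyRange 0 (bs.length : Int) 8).mapM (fun i =>
          (PySem.Int.ofCharsBase? (PySem.List.slice bs (some i) (some (i + 8))) 2).map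
            (fun v => Char.ofNat v.toNat))).map
        (fun l => String.ofList l)
  else none

-- ===== PORT B =====
-- ''.join('1' if (code >> k) & 1 else '0' for k in range(7, -1, -1))
def pvBits8 (code : Nat) : List Char :=
  (PySem.List.pyRange 7 (-1) (-1)).map (fun k => if ((code >>> k.toNat) &&& 1 : Nat) ≠ 0 then '1' else '0')

-- the decode loop of Source B: accumulator acc, bit counter cnt, output chars (none = ValueError)
def pvGoB : List Char → Nat → Nat → List Char → Option (List Char)
  | [], _, _, out => some out
  | b :: rest, acc, cnt, out =>
    if b = '1' then
      (if cnt + 1 = 8 then pvGoB rest 0 0 (out ++ [Char.ofNat (acc * 2 + 1)])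
       else pvGoB rest (acc * 2 + 1) (cnt + 1) out)
    else if b = '0' then
      (if cnt + 1 = 8 then pvGoB rest 0 0 (out ++ [Char.ofNat (acc * 2)])
       else pvGoB rest (acc * 2) (cnt + 1) out)
    else none

def binary_handler_alt (text : String) (choice : String) : Option String :=
  if choice = "1" then
    some (String.ofList (PySem.Chars.join [' ']
      (text.toList.foldl (fun out ch => out ++ [pvBits8 ch.toNat]) [])))
  else if choice = "2" then
    let bits := PySem.Chars.replace text.toList [' '] []
    if bits.length % 8 ≠ 0 then none  -- raise ValueError
    else (pvGoB bits 0 0 []).map (fun l => String.ofList l)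
  else none

-- ===== PRECONDITION & SPEC =====
-- Pre_ restricts choice '2' to text made of '0'/'1'/' ' whose non-space count is a multiple of 8:
-- outside it A either raises ValueError (wrong length, a chunk int() rejects), or decodes the
-- chunk only through int()'s incidental leniency (an underscore, a sign, or leading whitespace
-- such as a tab inside an 8-character chunk) — an artefact of using int() that no one would
-- specify for a binary string, and there B's own parse raises ValueError instead of returning.
def Pre_binary_handler (text : String) (choice : String) : Prop :=
  choice = "2" →
    (text.toList.all (fun c => c == '0' || c == '1' || c == ' ') = true ∧
      8 ∣ (text.toList.filter (fun c => c != ' ')).length)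
instance (text : String) (choice : String) : Decidable (Pre_binary_handler text choice) := by
  unfold Pre_binary_handler; infer_instance

def pvWitness_binary_handler : String × String := ("01000001 01100010", "2")

def Spec_binary_handler (text : String) (choice : String) (out : Option String) : Prop := out = binary_handler_alt text choice
instance (text : String) (choice : String) (out : Option String) : Decidable (Spec_binary_handler text choice out) := by unfold Spec_binary_handler; infer_instance

-- ===== CLAIM (what is proved, stated in full; the proofs are below) =====
def Claim_equal_binary_handler : Prop := ∀ (text : String) (choice : String), Dom_binary_handler text choice → Pre_binary_handler text choice → Spec_binary_handler text choice (binary_handler text choice)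

-- ===== LEMMAS AND PROOFS =====

-- the value of an all-binary chunk, MSB first
def pvBval (cs : List Char) : Nat := cs.foldl (fun a c => a * 2 + if c = '1' then 1 else 0) 0

-- the common decoded result: k chunks of 8 bits each
def pvSpecDec : Nat → List Char → List Char
  | 0, _ => []
  | k + 1, bs => Char.ofNat (pvBval (bs.take 8)) :: pvSpecDec k (bs.drop 8)

set_option maxRecDepth 8192 in
lemma pv_fmt_eq_bits : ∀ n : Fin 256, pvFmt08b n.val = pvBits8 n.val := by decide

lemma pv_replace_go_filter :
    ∀ (fuel : Nat) (l acc : List Char), l.length ≤ fuel →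
      PySem.Chars.replace.go [' '] [] fuel l acc = acc.reverse ++ l.filter (fun c => c != ' ') := by
  intro fuel
  induction fuel with
  | zero =>
    intro l acc h
    have : l = [] := List.length_eq_zero_iff.mp (by omega)
    subst this
    simp [PySem.Chars.replace.go]
  | succ n ih =>
    intro l acc h
    cases l with
    | nil => simp [PySem.Chars.replace.go]
    | cons c t =>
      simp only [PySem.Chars.replace.go]
      by_cases hc : c = ' '
      · subst hc
        rw [if_pos (by simp [List.isPrefixOf])]
        simpa using ih t acc (by simpa using Nat.le_of_succ_le_succ h)
      · rw [if_neg (by simp only [List.isPrefixOf, Bool.and_eq_true, beq_iff_eq]; exact fun hh => hc hh.1.symm)]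
        rw [ih t (c :: acc) (by simpa using Nat.le_of_succ_le_succ h)]
        simp [hc]

lemma pv_replace_filter (cs : List Char) :
    PySem.Chars.replace cs [' '] [] = cs.filter (fun c => c != ' ') := by
  simp only [PySem.Chars.replace, List.isEmpty_cons]
  simpa using pv_replace_go_filter cs.length cs [] le_rfl

lemma pv_chunk_parse_bool :
    ∀ b1 b2 b3 b4 b5 b6 b7 b8 : Bool,
      PySem.Int.ofCharsBase?
        (([b1, b2, b3, b4, b5, b6, b7, b8].map (fun b => if b then '1' else '0'))) 2 =
      some ((pvBval ([b1, b2, b3, b4, b5, b6, b7, b8].map (fun b => if b then '1' else '0')) : Nat) : Int) := by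
  decide

lemma pv_chunk_parse (cs : List Char) (hlen : cs.length = 8)
    (hbin : ∀ c ∈ cs, c = '0' ∨ c = '1') :
    PySem.Int.ofCharsBase? cs 2 = some ((pvBval cs : Nat) : Int) := by
  rcases cs with _ | ⟨c1, _ | ⟨c2, _ | ⟨c3, _ | ⟨c4, _ | ⟨c5, _ | ⟨c6, _ | ⟨c7, _ | ⟨c8, rest⟩⟩⟩⟩⟩⟩⟩⟩ <;>
    simp only [List.length_cons, List.length_nil] at hlen
  · omega
  · omega
  · omega
  · omega
  · omega
  · omega
  · omega
  · omega
  · have hrest : rest = [] := by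
      have := hlen; exact List.length_eq_zero_iff.mp (by omega)
    subst hrest
    have e : ∀ c : Char, c = '0' ∨ c = '1' → c = (if c = '1' then '1' else '0') := by
      rintro c (rfl | rfl) <;> rfl
    rw [e c1 (hbin c1 (by simp)), e c2 (hbin c2 (by simp)), e c3 (hbin c3 (by simp)),
        e c4 (hbin c4 (by simp)), e c5 (hbin c5 (by simp)), e c6 (hbin c6 (by simp)),
        e c7 (hbin c7 (by simp)), e c8 (hbin c8 (by simp))]
    simpa using pv_chunk_parse_bool (decide (c1 = '1')) (decide (c2 = '1')) (decide (c3 = '1'))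
      (decide (c4 = '1')) (decide (c5 = '1')) (decide (c6 = '1')) (decide (c7 = '1')) (decide (c8 = '1'))

lemma pv_pyRange_eight (k : Nat) :
    PySem.List.pyRange 0 ((8 * k : Nat) : Int) 8 =
      (List.range k).map (fun j => ((8 * j : Nat) : Int)) := by
  rw [PySem.List.pyRange_of_pos 0 ((8 * k : Nat) : Int) (by norm_num)]
  have hc : (if (0 : Int) < ((8 * k : Nat) : Int) then ((((8 * k : Nat) : Int) - 0 + 8 - 1) / 8).toNat else 0) = k := by
    split <;> omega
  rw [hc]
  apply List.map_congr_left
  intro j _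
  push_cast
  ring

lemma pv_A_dec :
    ∀ (k : Nat) (bs : List Char), (∀ c ∈ bs, c = '0' ∨ c = '1') → bs.length = 8 * k →
      (PySem.List.pyRange 0 (bs.length : Int) 8).mapM (fun i =>
          (PySem.Int.ofCharsBase? (PySem.List.slice bs (some i) (some (i + 8))) 2).map
            (fun v => Char.ofNat v.toNat)) = some (pvSpecDec k bs) := by
  intro k
  induction k with
  | zero =>
    intro bs _ hlen
    have : bs = [] := List.length_eq_zero_iff.mp (by omega)
    subst this
    simp [PySem.List.pyRange, pvSpecDec]
  | succ k ih =>
    intro bs hbin hlen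
    rw [hlen, pv_pyRange_eight, List.mapM_map, List.range_succ_eq_map, List.mapM_cons]
    have h0 : PySem.List.slice bs (some ((8 * 0 : Nat) : Int)) (some (((8 * 0 : Nat) : Int) + 8)) = bs.take 8 := by
      have : ((8 * 0 : Nat) : Int) = ((0 : Nat) : Int) := by norm_num
      rw [this]
      have : (((0 : Nat) : Int) + 8) = ((8 : Nat) : Int) := by norm_num
      rw [this, PySem.List.slice_natCast]
      simp
    have htake : (bs.take 8).length = 8 := by simp; omega
    have hbtake : ∀ c ∈ bs.take 8, c = '0' ∨ c = '1' := fun c hc => hbin c (List.mem_of_mem_take hc)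
    have hshift : ∀ j : Nat,
        PySem.List.slice bs (some ((8 * (Nat.succ j) : Nat) : Int)) (some (((8 * (Nat.succ j) : Nat) : Int) + 8)) =
        PySem.List.slice (bs.drop 8) (some ((8 * j : Nat) : Int)) (some (((8 * j : Nat) : Int) + 8)) := by
      intro j
      have e1 : (((8 * (Nat.succ j) : Nat) : Int) + 8) = ((8 * Nat.succ j + 8 : Nat) : Int) := by push_cast; ring
      have e2 : (((8 * j : Nat) : Int) + 8) = ((8 * j + 8 : Nat) : Int) := by push_cast; ring
      rw [e1, e2, PySem.List.slice_natCast, PySem.List.slice_natCast, List.drop_drop]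
      have h3 : 8 * Nat.succ j + 8 - 8 * Nat.succ j = 8 := by omega
      have h4 : 8 * j + 8 - 8 * j = 8 := by omega
      have h5 : 8 + 8 * j = 8 * Nat.succ j := by omega
      rw [h3, h4, h5]
    have htail :
        (List.mapM ((fun i =>
            (PySem.Int.ofCharsBase? (PySem.List.slice bs (some i) (some (i + 8))) 2).map
              (fun v => Char.ofNat v.toNat)) ∘ fun j => ((8 * j : Nat) : Int))
          (List.map Nat.succ (List.range k))) = some (pvSpecDec k (bs.drop 8)) := by
      rw [List.mapM_map]
      have hfun : (((fun i =>
            (PySem.Int.ofCharsBase? (PySem.List.slice bs (some i) (some (i + 8))) 2).map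
              (fun v => Char.ofNat v.toNat)) ∘ (fun j => ((8 * j : Nat) : Int))) ∘ Nat.succ) =
          ((fun i =>
            (PySem.Int.ofCharsBase? (PySem.List.slice (bs.drop 8) (some i) (some (i + 8))) 2).map
              (fun v => Char.ofNat v.toNat)) ∘ fun j => ((8 * j : Nat) : Int)) := by
        funext j
        simp only [Function.comp]
        rw [hshift j]
      rw [hfun, ← List.mapM_map]
      have hlen' : (bs.drop 8).length = 8 * k := by simp; omega
      have := ih (bs.drop 8) (fun c hc => hbin c (List.mem_of_mem_drop hc)) hlen'
      rw [hlen', pv_pyRange_eight] at this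
      exact this
    simp only [Function.comp] at htail ⊢
    rw [h0, pv_chunk_parse (bs.take 8) htake hbtake]
    rw [htail]
    simp [pvSpecDec]

lemma pv_goB_chunk :
    ∀ (c rest : List Char) (acc cnt : Nat) (out : List Char),
      (∀ x ∈ c, x = '0' ∨ x = '1') → cnt + c.length = 8 → cnt < 8 →
      pvGoB (c ++ rest) acc cnt out =
        pvGoB rest 0 0 (out ++ [Char.ofNat (c.foldl (fun a x => a * 2 + if x = '1' then 1 else 0) acc)]) := by
  intro c
  induction c with
  | nil => intro rest acc cnt out _ h8 hlt; simp at h8; omega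
  | cons x t ih =>
    intro rest acc cnt out hbin h8 hlt
    rcases hbin x (by simp) with rfl | rfl
    · by_cases hend : cnt + 1 = 8
      · have ht : t = [] := by
          have := h8; simp at this; exact List.length_eq_zero_iff.mp (by omega)
        subst ht
        simp [pvGoB, hend]
      · simp only [List.cons_append, pvGoB, if_neg (show ¬('0' : Char) = '1' by decide), if_neg hend]
        rw [ih rest (acc * 2) (cnt + 1) out (fun y hy => hbin y (by simp [hy]))
          (by simp at h8 ⊢; omega) (by omega)]
        simp
    · by_cases hend : cnt + 1 = 8
      · have ht : t = [] := by
          have := h8; simp at this; exact List.length_eq_zero_iff.mp (by omega)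
        subst ht
        simp [pvGoB, hend]
      · simp only [List.cons_append, pvGoB, if_neg hend]
        rw [ih rest (acc * 2 + 1) (cnt + 1) out (fun y hy => hbin y (by simp [hy]))
          (by simp at h8 ⊢; omega) (by omega)]
        simp
lemma pv_B_dec :
    ∀ (k : Nat) (bs : List Char) (out : List Char), (∀ c ∈ bs, c = '0' ∨ c = '1') → bs.length = 8 * k →
      pvGoB bs 0 0 out = some (out ++ pvSpecDec k bs) := by
  intro k
  induction k with
  | zero =>
    intro bs out _ hlen
    have : bs = [] := List.length_eq_zero_iff.mp (by omega)
    subst this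
    simp [pvGoB, pvSpecDec]
  | succ k ih =>
    intro bs out hbin hlen
    have hsplit : bs = bs.take 8 ++ bs.drop 8 := (List.take_append_drop 8 bs).symm
    rw [hsplit] at hbin ⊢
    rw [pv_goB_chunk (bs.take 8) (bs.drop 8) 0 0 out
      (fun x hx => hbin x (List.mem_append_left _ hx))
      (by simp; omega) (by omega)]
    rw [ih (bs.drop 8) _ (fun c hc => hbin c (List.mem_append_right _ hc)) (by simp; omega)]
    simp [pvSpecDec, pvBval]

-- ===== VERDICT (by name: the statement is the Claim_ definition above) =====
theorem binary_handler_spec : Claim_equal_binary_handler := by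
  intro text choice hdom hpre
  unfold Spec_binary_handler binary_handler binary_handler_alt
  by_cases h1 : choice = "1"
  · rw [if_pos h1, if_pos h1]
    rw [PySem.List.foldl_append_singleton_eq_map]
    simp only [List.nil_append]
    congr 2
    congr 1
    apply List.map_congr_left
    intro c hc
    have hc256 : c.toNat < 256 := by
      have : pvDomChar c = true := by
        unfold Dom_binary_handler pvDomStr at hdom
        simp only [Bool.and_eq_true, List.all_eq_true] at hdom
        exact hdom.1 c hc
      unfold pvDomChar at this
      simp only [Bool.or_eq_true, Bool.and_eq_true, decide_eq_true_eq, beq_iff_eq] at this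
      omega
    exact pv_fmt_eq_bits ⟨c.toNat, hc256⟩
  · rw [if_neg h1, if_neg h1]
    by_cases h2 : choice = "2"
    · rw [if_pos h2, if_pos h2]
      obtain ⟨hbin'', hdvd⟩ := hpre h2
      have hbin' : ∀ c ∈ text.toList, c = '0' ∨ c = '1' ∨ c = ' ' := by
        intro c hc
        have := List.all_eq_true.mp hbin'' c hc
        simp at this
        tauto
      simp only [pv_replace_filter]
      set bs := text.toList.filter (fun c => c != ' ') with hbs
      have hbin : ∀ c ∈ bs, c = '0' ∨ c = '1' := by
        intro c hc
        rw [hbs, List.mem_filter] at hc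
        rcases hbin' c hc.1 with h | h | h
        · exact Or.inl h
        · exact Or.inr h
        · exfalso; have := hc.2; simp [h] at this
      obtain ⟨k, hk⟩ := hdvd
      rw [if_neg (by omega), if_neg (by omega)]
      rw [pv_A_dec k bs hbin hk, pv_B_dec k bs [] hbin hk]
      simp
    · rw [if_neg h2, if_neg h2]
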